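-- pv_equiv track=rewrite | github.com/ch83baker/cards_eq_solver | subset_graph_classes/my_subset_graph_new.py | encode_members_as_bin_tuple
-- ===== SOURCE A (Python) =====
-- def encode_members_as_bin_tuple(short_list, items):
--     """Encode a sequence (the list of items in a subset)
--     as a characteristic tuple.
--
--     Parameters:
--     -----------
--     short_list: Iterable
--        The set of items in the subset of choice.
--     items: Iterable
--        the iterable giving you the items.
--     """
--     num_terms = len(items)
--     output = [0 for j in range(num_terms)]
--     for j in short_list:
--         for pair in enumerate(items):
--             if pair[1] == j:
--                 output[pair[0]] = 1
--     return tuple(output)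
-- ===== SOURCE B (Python) =====
-- def encode_members_as_bin_tuple(short_list, items):
--     """Characteristic 0/1 tuple: one pass over items with a precomputed set."""
--     members = set(short_list)
--     return tuple(1 if x in members else 0 for x in items)
-- ===== Notes on version B (the rewrite author's own statement) =====
-- stated objective: faster
-- what changed: Replaced the nested loops (for each element of short_list, scan all of enumerate(items) and set matching positions) by building a set of short_list once and producing the tuple in a single pass over items.
import Mathlib
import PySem

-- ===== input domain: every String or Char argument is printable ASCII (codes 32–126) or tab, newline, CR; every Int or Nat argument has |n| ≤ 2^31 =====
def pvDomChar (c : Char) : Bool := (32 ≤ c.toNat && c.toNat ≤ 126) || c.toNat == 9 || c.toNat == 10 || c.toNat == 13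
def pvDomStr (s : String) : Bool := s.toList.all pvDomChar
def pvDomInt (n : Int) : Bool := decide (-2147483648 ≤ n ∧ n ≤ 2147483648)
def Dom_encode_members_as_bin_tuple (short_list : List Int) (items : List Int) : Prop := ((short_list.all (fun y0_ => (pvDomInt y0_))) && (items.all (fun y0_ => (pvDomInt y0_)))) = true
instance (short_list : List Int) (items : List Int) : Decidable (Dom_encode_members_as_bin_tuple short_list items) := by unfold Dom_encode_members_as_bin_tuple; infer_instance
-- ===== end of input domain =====

-- B replaces A's nested loops by a set built once and a single pass over items (asymptotically faster).
-- ===== PORT A =====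
def encode_members_as_bin_tuple (short_list : List Int) (items : List Int) : List Int :=
  let num_terms := items.length
  let output := List.replicate num_terms (0 : Int)
  let output := short_list.foldl (fun output j =>
    (PySem.List.enumerate items).foldl (fun output pair =>
      if pair.2 == j then PySem.List.pySetD output pair.1 1 else output) output) output
  output

-- ===== PORT B =====
def encode_members_as_bin_tuple_alt (short_list : List Int) (items : List Int) : List Int :=
  let members := PySem.Set.ofList short_list
  items.map (fun x => if PySem.Set.contains members x then (1 : Int) else 0)

-- ===== PRECONDITION & SPEC =====
def Spec_encode_members_as_bin_tuple (short_list : List Int) (items : List Int) (out : List Int) : Prop := out = encode_members_as_bin_tuple_alt short_list items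
instance (short_list : List Int) (items : List Int) (out : List Int) : Decidable (Spec_encode_members_as_bin_tuple short_list items out) := by unfold Spec_encode_members_as_bin_tuple; infer_instance

-- ===== CLAIM (what is proved, stated in full; the proofs are below) =====
def Claim_equal_encode_members_as_bin_tuple : Prop := ∀ (short_list : List Int) (items : List Int), Dom_encode_members_as_bin_tuple short_list items → Spec_encode_members_as_bin_tuple short_list items (encode_members_as_bin_tuple short_list items)

-- ===== LEMMAS AND PROOFS =====

-- ===== VERDICT (by name: the statement is the Claim_ definition above) =====
-- inner loop: 'for pair in enumerate(items): if pair[1]==j: output[pair[0]]=1', with start s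
lemma pv_inner (items : List Int) (j : Int) : ∀ (s : Nat) (out : List Int) (p : Nat),
    ((PySem.List.enumerate items (s : Int)).foldl (fun output pair =>
      if pair.2 == j then PySem.List.pySetD output pair.1 1 else output) out)[p]? =
    if s ≤ p ∧ items[p - s]? = some j then out[p]?.map (fun _ => (1 : Int)) else out[p]? := by
  induction items with
  | nil => intro s out p; simp [PySem.List.enumerate_nil]
  | cons x xs ih =>
    intro s out p
    rw [PySem.List.enumerate_cons, List.foldl_cons]
    have hcast : (s : Int) + 1 = ((s + 1 : Nat) : Int) := by push_cast; ring
    rw [hcast, ih (s + 1)]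
    by_cases hps : p = s
    · subst hps
      simp only [Nat.sub_self, List.getElem?_cons_zero]
      have h1 : ¬ (p + 1 ≤ p ∧ xs[p - (p + 1)]? = some j) := by omega
      rw [if_neg h1]
      by_cases hxj : x = j
      · simp only [hxj, beq_self_eq_true, if_true, PySem.List.pySetD_natCast,
          List.getElem?_set]
        by_cases hlen : p < out.length
        · simp [hlen]
        · simp [hlen]
      · simp [hxj, beq_iff_eq]
    · by_cases hlt : p < s
      · have h1 : ¬ (s + 1 ≤ p ∧ xs[p - (s + 1)]? = some j) := by omega
        have h2 : ¬ (s ≤ p ∧ (x :: xs)[p - s]? = some j) := by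
          intro h; omega
        rw [if_neg h1, if_neg h2]
        by_cases hxj : x = j
        · simp [hxj, PySem.List.pySetD_natCast, List.getElem?_set_ne (by omega : s ≠ p)]
        · simp [hxj, beq_iff_eq]
      · -- p > s
        have hgt : s < p := by omega
        have hidx : (x :: xs)[p - s]? = xs[p - (s + 1)]? := by
          have : p - s = (p - (s + 1)) + 1 := by omega
          rw [this, List.getElem?_cons_succ]
        have hcond : (s + 1 ≤ p ∧ xs[p - (s + 1)]? = some j) ↔
            (s ≤ p ∧ (x :: xs)[p - s]? = some j) := by
          rw [hidx]; constructor <;> (intro h; exact ⟨by omega, h.2⟩)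
        have hout : (if x == j then PySem.List.pySetD out (s : Int) 1 else out)[p]? = out[p]? := by
          by_cases hxj : x = j
          · simp [hxj, PySem.List.pySetD_natCast, List.getElem?_set_ne (by omega : s ≠ p)]
          · simp [hxj, beq_iff_eq]
        rw [hout]
        by_cases hc : s + 1 ≤ p ∧ xs[p - (s + 1)]? = some j
        · rw [if_pos hc, if_pos (hcond.mp hc)]
        · rw [if_neg hc, if_neg (fun h => hc (hcond.mpr h))]

-- outer loop: 'for j in short_list: <inner loop>'
lemma pv_outer (items : List Int) : ∀ (sl : List Int) (out : List Int) (p : Nat),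
    (sl.foldl (fun output j =>
      (PySem.List.enumerate items).foldl (fun output pair =>
        if pair.2 == j then PySem.List.pySetD output pair.1 1 else output) output) out)[p]? =
    if (∃ j ∈ sl, items[p]? = some j) then out[p]?.map (fun _ => (1 : Int)) else out[p]? := by
  intro sl
  induction sl with
  | nil => intro out p; simp
  | cons j sl ih =>
    intro out p
    rw [List.foldl_cons, ih]
    have hzero : (PySem.List.enumerate items) = PySem.List.enumerate items ((0 : Nat) : Int) := by
      norm_num
    have hinner := pv_inner items j 0 out p
    rw [hzero]
    simp only [Nat.zero_le, true_and, Nat.sub_zero] at hinner ⊢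
    by_cases hj : items[p]? = some j
    · rw [hinner, if_pos hj]
      have : ∃ j' ∈ j :: sl, items[p]? = some j' := ⟨j, List.mem_cons_self, hj⟩
      rw [if_pos this]
      by_cases hc : ∃ j' ∈ sl, items[p]? = some j'
      · rw [if_pos hc]; cases out[p]? <;> simp
      · rw [if_neg hc]
    · rw [hinner, if_neg hj]
      by_cases hc : ∃ j' ∈ sl, items[p]? = some j'
      · rw [if_pos hc]
        rw [if_pos (by obtain ⟨j', hm, he⟩ := hc; exact ⟨j', List.mem_cons_of_mem _ hm, he⟩)]
      · rw [if_neg hc]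
        rw [if_neg (by rintro ⟨j', hm, he⟩
                       rcases List.mem_cons.mp hm with rfl | hm
                       · exact hj he
                       · exact hc ⟨j', hm, he⟩)]

theorem encode_members_as_bin_tuple_spec : Claim_equal_encode_members_as_bin_tuple := by
  intro short_list items _
  unfold Spec_encode_members_as_bin_tuple encode_members_as_bin_tuple encode_members_as_bin_tuple_alt
  apply List.ext_getElem?
  intro p
  rw [pv_outer items short_list (List.replicate items.length 0) p, List.getElem?_map]
  by_cases hp : p < items.length
  · rw [List.getElem?_replicate_of_lt hp, List.getElem?_eq_getElem hp]
    by_cases hmem : items[p] ∈ short_list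
    · simp [hmem]
    · simp [hmem]
  · have h1 : items[p]? = none := List.getElem?_eq_none (by omega)
    have h2 : (List.replicate items.length (0 : Int))[p]? = none :=
      List.getElem?_eq_none (by simp; omega)
    rw [h1, h2]
    split <;> simp
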